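-- pv_equiv track=rewrite | github.com/YueyingTIAN/CMT120Fundamentals-of-Programming- | c21013017.py | isGreaterThan
-- ===== SOURCE A (Python) =====
-- def isGreaterThan(dict1,dict2):
--
--     """
--     Intialize a variable is_strictly_greater to False,
--     denoting whether dict1 is strictly greater than dict2 in at least one key.
--
--     Check every key k1 in dict1, get corresponding value num1.
--     Then get value num2 for k1 in dict2.
--
--     Compare num1 and num2.
--
--     If num1 < num2, then dict1 is strictly smaller than dict2 in at least one key.
--     In this case, directly return False.
--
--     If num1 > num2, then dict1 is strictly greater than dict2 in at least one key.
--     In this case, set is_strictly_greater to True.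
--
--     Check every key k2 in dict2.
--     Follow similar logics as above.
--
--     If the two for loops go through, then it means
--     dict1 is greater than or equal to dict2 with respect to all the keys.
--
--     Then return is_strictly_greater.
--     """
--
--     is_strictly_greater = False
--
--     for k1 in dict1:
--         num1 = dict1[k1]
--         # If dict2 does not contain k1, then get 0
--         num2 = dict2.get(k1, 0)
--         if num1 < num2:
--             return False
--         if num1 > num2:
--             is_strictly_greater = True
--
--     for k2 in dict2:
--         num1 = dict1.get(k2, 0)
--         num2 = dict2[k2]
--         if num1 < num2:
--             return False
--         if num1 > num2:
--             is_strictly_greater = True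
--
--     return is_strictly_greater
-- ===== SOURCE B (Python) =====
-- def isGreaterThan(dict1, dict2):
--     a = sorted(dict1.items(), key=lambda kv: kv[0])
--     b = sorted(dict2.items(), key=lambda kv: kv[0])
--     i = j = 0
--     strict = False
--     while i < len(a) or j < len(b):
--         if j == len(b) or (i < len(a) and a[i][0] < b[j][0]):
--             v1, v2 = a[i][1], 0
--             i += 1
--         elif i == len(a) or b[j][0] < a[i][0]:
--             v1, v2 = 0, b[j][1]
--             j += 1
--         else:
--             v1, v2 = a[i][1], b[j][1]
--             i += 1
--             j += 1
--         if v1 < v2: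
--             return False
--         if v1 > v2:
--             strict = True
--     return strict
-- ===== Notes on version B (the rewrite author's own statement) =====
-- stated objective: alternative
-- what changed: Replaces A's two interleaved flag-updating loops over each dict (with repeated lookups of shared keys) by a sort-then-merge algorithm: both item lists are sorted by key and compared in a single two-pointer merge that pairs equal keys and treats unmatched keys as value 0.
import Mathlib
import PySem

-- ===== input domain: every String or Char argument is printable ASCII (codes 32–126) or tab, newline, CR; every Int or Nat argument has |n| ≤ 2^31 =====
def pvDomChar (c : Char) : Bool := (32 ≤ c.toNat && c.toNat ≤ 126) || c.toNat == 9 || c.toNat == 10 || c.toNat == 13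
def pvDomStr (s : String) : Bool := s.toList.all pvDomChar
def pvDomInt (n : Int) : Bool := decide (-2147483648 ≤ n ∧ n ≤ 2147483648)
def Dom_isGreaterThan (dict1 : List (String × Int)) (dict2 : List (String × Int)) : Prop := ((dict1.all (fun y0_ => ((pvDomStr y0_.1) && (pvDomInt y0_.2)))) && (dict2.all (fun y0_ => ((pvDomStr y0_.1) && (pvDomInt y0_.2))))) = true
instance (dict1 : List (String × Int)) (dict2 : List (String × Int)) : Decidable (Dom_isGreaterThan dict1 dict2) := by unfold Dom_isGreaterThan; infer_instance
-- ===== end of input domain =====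

-- B replaces A's two interleaved dict loops by a different algorithm: sort both item
-- lists by key and compare them with one two-pointer merge (objective: alternative).

-- ===== PORT A =====
-- second loop of A: 'for k2 in dict2' — num1 = dict1.get(k2, 0), num2 = dict2[k2]
-- (k2 ranges over dict2's keys, so the indexing dict2[k2] always succeeds; ported as
-- (get? …).getD 0, exact on every key the loop visits)
def aLoop2 (D1 D2 : PySem.Dict String Int) (ks : List String) (flag : Bool) : Bool :=
  match ks with
  | [] => flag
  | k :: rest =>
    let num1 := D1.getD k 0
    let num2 := (D2.get? k).getD 0
    if num1 < num2 then false
    else if num1 > num2 then aLoop2 D1 D2 rest true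
    else aLoop2 D1 D2 rest flag

-- first loop of A: 'for k1 in dict1' — num1 = dict1[k1], num2 = dict2.get(k1, 0);
-- when it finishes it falls through into the second loop
def aLoop1 (D1 D2 : PySem.Dict String Int) (ks : List String) (flag : Bool) : Bool :=
  match ks with
  | [] => aLoop2 D1 D2 D2.keys flag
  | k :: rest =>
    let num1 := (D1.get? k).getD 0
    let num2 := D2.getD k 0
    if num1 < num2 then false
    else if num1 > num2 then aLoop1 D1 D2 rest true
    else aLoop1 D1 D2 rest flag

def isGreaterThan (dict1 : List (String × Int)) (dict2 : List (String × Int)) : Bool :=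
  let D1 := PySem.Dict.ofList dict1
  let D2 := PySem.Dict.ofList dict2
  aLoop1 D1 D2 D1.keys false

-- ===== PORT B =====
-- the while loop of Source B: i/j advance through the sorted item lists; ported as
-- recursion on the two suffixes a (= a[i:]) and b (= b[j:])
def mergeLoop (a b : List (String × Int)) (strict : Bool) : Bool :=
  match a, b with
  | [], [] => strict
  | p :: a', [] =>
    -- j == len(b): v1, v2 = a[i][1], 0
    if p.2 < 0 then false
    else if p.2 > 0 then mergeLoop a' [] true
    else mergeLoop a' [] strict
  | [], q :: b' =>
    -- i == len(a): v1, v2 = 0, b[j][1]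
    if (0 : Int) < q.2 then false
    else if (0 : Int) > q.2 then mergeLoop [] b' true
    else mergeLoop [] b' strict
  | p :: a', q :: b' =>
    if p.1 < q.1 then
      if p.2 < 0 then false
      else if p.2 > 0 then mergeLoop a' (q :: b') true
      else mergeLoop a' (q :: b') strict
    else if q.1 < p.1 then
      if (0 : Int) < q.2 then false
      else if (0 : Int) > q.2 then mergeLoop (p :: a') b' true
      else mergeLoop (p :: a') b' strict
    else
      if p.2 < q.2 then false
      else if p.2 > q.2 then mergeLoop a' b' true
      else mergeLoop a' b' strict

def isGreaterThan_alt (dict1 : List (String × Int)) (dict2 : List (String × Int)) : Bool :=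
  let D1 := PySem.Dict.ofList dict1
  let D2 := PySem.Dict.ofList dict2
  let a := PySem.List.sorted D1.items (fun kv => kv.1) false
  let b := PySem.List.sorted D2.items (fun kv => kv.1) false
  mergeLoop a b false

-- ===== PRECONDITION & SPEC =====
def Spec_isGreaterThan (dict1 : List (String × Int)) (dict2 : List (String × Int)) (out : Bool) : Prop := out = isGreaterThan_alt dict1 dict2
instance (dict1 : List (String × Int)) (dict2 : List (String × Int)) (out : Bool) : Decidable (Spec_isGreaterThan dict1 dict2 out) := by unfold Spec_isGreaterThan; infer_instance

-- ===== CLAIM (what is proved, stated in full; the proofs are below) =====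
def Claim_equal_isGreaterThan : Prop := ∀ (dict1 : List (String × Int)) (dict2 : List (String × Int)), Dom_isGreaterThan dict1 dict2 → Spec_isGreaterThan dict1 dict2 (isGreaterThan dict1 dict2)

-- ===== LEMMAS AND PROOFS =====

-- association-list lookup with default 0 (proof-side helper)
def lk : List (String × Int) → String → Int
  | [], _ => 0
  | p :: rest, k => if p.1 = k then p.2 else lk rest k

theorem lk_eq_zero (l : List (String × Int)) (k : String) (h : ∀ r ∈ l, r.1 ≠ k) : lk l k = 0 := by
  induction l with
  | nil => rfl
  | cons p rest ih =>
    simp only [lk]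
    rw [if_neg (h p (by simp)), ih (fun r hr => h r (by simp [hr]))]

theorem lk_of_mem (l : List (String × Int)) (k : String) (v : Int)
    (hmem : (k, v) ∈ l) (hnd : (l.map Prod.fst).Nodup) : lk l k = v := by
  induction l with
  | nil => simp at hmem
  | cons p rest ih =>
    simp only [List.map_cons, List.nodup_cons] at hnd
    rcases List.mem_cons.mp hmem with h | h
    · simp [lk, ← h]
    · have : p.1 ≠ k := by
        intro hk
        exact hnd.1 (by simpa [hk] using List.mem_map_of_mem (f := Prod.fst) h)
      simp only [lk, if_neg this]
      exact ih h hnd.2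

theorem anyCongrMem {α : Type} (l : List α) (p q : α → Bool) (h : ∀ x ∈ l, p x = q x) :
    l.any p = l.any q := by
  induction l with
  | nil => rfl
  | cons x rest ih =>
    simp only [List.any_cons, h x (by simp), ih (fun r hr => h r (by simp [hr]))]

-- characterization of the merge loop over strictly key-sorted lists
theorem mergeLoop_eq (a b : List (String × Int)) (flag : Bool)
    (ha : a.Pairwise (fun p q => p.1 < q.1)) (hb : b.Pairwise (fun p q => p.1 < q.1)) :
    mergeLoop a b flag =
      if (a.any (fun p => p.2 < lk b p.1) || b.any (fun q => lk a q.1 < q.2)) then false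
      else (flag || (a.any (fun p => lk b p.1 < p.2) || b.any (fun q => q.2 < lk a q.1))) := by
  match a, b with
  | [], [] => simp [mergeLoop]
  | p :: a', [] =>
    have ha' := (List.pairwise_cons.mp ha).2
    have ihT := mergeLoop_eq a' [] true ha' hb
    have ihF := mergeLoop_eq a' [] flag ha' hb
    simp only [mergeLoop, List.any_cons, lk, List.any_nil] at *
    by_cases h1 : p.2 < 0
    · simp [h1]
    · by_cases h2 : (0:Int) < p.2
      · simp [h1, h2, gt_iff_lt, ihT]
      · have he : p.2 = 0 := le_antisymm (not_lt.mp h2) (not_lt.mp h1)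
        simp [gt_iff_lt, h1, h2, he, ihF]
  | [], q :: b' =>
    have hb' := (List.pairwise_cons.mp hb).2
    have ihT := mergeLoop_eq [] b' true ha hb'
    have ihF := mergeLoop_eq [] b' flag ha hb'
    simp only [mergeLoop, List.any_cons, lk, List.any_nil] at *
    by_cases h1 : (0:Int) < q.2
    · simp [h1]
    · by_cases h2 : q.2 < 0
      · simp [h1, h2, gt_iff_lt, ihT]
      · have he : q.2 = 0 := le_antisymm (not_lt.mp h1) (not_lt.mp h2)
        simp [gt_iff_lt, h1, h2, he, ihF]
  | p :: a', q :: b' =>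
    have ha' := (List.pairwise_cons.mp ha).2
    have hb' := (List.pairwise_cons.mp hb).2
    by_cases hab : p.1 < q.1
    · -- p's key absent from q :: b'
      have hbkeys : ∀ r ∈ q :: b', p.1 < r.1 := by
        intro r hr
        rcases List.mem_cons.mp hr with h | h
        · exact h ▸ hab
        · exact lt_trans hab ((List.pairwise_cons.mp hb).1 r h)
      have hlk : lk (q :: b') p.1 = 0 :=
        lk_eq_zero _ _ (fun r hr => ne_of_gt (hbkeys r hr))
      have hhead : lk (p :: a') q.1 = lk a' q.1 := by
        have : p.1 ≠ q.1 := ne_of_lt hab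
        simp [lk, this]
      have hc1 : (b'.any fun r => decide (lk (p :: a') r.1 < r.2)) =
          (b'.any fun r => decide (lk a' r.1 < r.2)) := by
        refine anyCongrMem _ _ _ (fun r hr => ?_)
        have : p.1 ≠ r.1 := ne_of_lt (hbkeys r (by simp [hr]))
        simp [lk, this]
      have hc2 : (b'.any fun r => decide (r.2 < lk (p :: a') r.1)) =
          (b'.any fun r => decide (r.2 < lk a' r.1)) := by
        refine anyCongrMem _ _ _ (fun r hr => ?_)
        have : p.1 ≠ r.1 := ne_of_lt (hbkeys r (by simp [hr]))
        simp [lk, this]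
      have ihT := mergeLoop_eq a' (q :: b') true ha' hb
      have ihF := mergeLoop_eq a' (q :: b') flag ha' hb
      simp only [mergeLoop, if_pos hab, List.any_cons, hlk]
      by_cases h1 : p.2 < 0
      · simp [h1]
      · by_cases h2 : (0:Int) < p.2
        · rw [ihT] at *
          simp [gt_iff_lt, h1, h2, hhead, hc1, hc2]
        · have he : p.2 = 0 := le_antisymm (not_lt.mp h2) (not_lt.mp h1)
          rw [ihF] at *
          simp [gt_iff_lt, h1, h2, hhead, hc1, hc2]
    · by_cases hba : q.1 < p.1
      · -- q's key absent from p :: a'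
        have hakeys : ∀ r ∈ p :: a', q.1 < r.1 := by
          intro r hr
          rcases List.mem_cons.mp hr with h | h
          · exact h ▸ hba
          · exact lt_trans hba ((List.pairwise_cons.mp ha).1 r h)
        have hlk : lk (p :: a') q.1 = 0 :=
          lk_eq_zero _ _ (fun r hr => ne_of_gt (hakeys r hr))
        have hhead : lk (q :: b') p.1 = lk b' p.1 := by
          have : q.1 ≠ p.1 := ne_of_lt hba
          simp [lk, this]
        have hc1 : (a'.any fun r => decide (r.2 < lk (q :: b') r.1)) =
            (a'.any fun r => decide (r.2 < lk b' r.1)) := by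
          refine anyCongrMem _ _ _ (fun r hr => ?_)
          have : q.1 ≠ r.1 := ne_of_lt (hakeys r (by simp [hr]))
          simp [lk, this]
        have hc2 : (a'.any fun r => decide (lk (q :: b') r.1 < r.2)) =
            (a'.any fun r => decide (lk b' r.1 < r.2)) := by
          refine anyCongrMem _ _ _ (fun r hr => ?_)
          have : q.1 ≠ r.1 := ne_of_lt (hakeys r (by simp [hr]))
          simp [lk, this]
        have ihT := mergeLoop_eq (p :: a') b' true ha hb'
        have ihF := mergeLoop_eq (p :: a') b' flag ha hb'
        simp only [mergeLoop, if_neg hab, if_pos hba, List.any_cons, hlk]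
        by_cases h1 : (0:Int) < q.2
        · simp [h1]
        · by_cases h2 : q.2 < 0
          · rw [ihT] at *
            simp [gt_iff_lt, h1, h2, hhead, hc1, hc2]
          · have he : q.2 = 0 := le_antisymm (not_lt.mp h1) (not_lt.mp h2)
            rw [ihF] at *
            simp [gt_iff_lt, h1, h2, hhead, hc1, hc2]
      · -- equal keys
        have heq : p.1 = q.1 := le_antisymm (not_lt.mp hba) (not_lt.mp hab)
        have hlkb : lk (q :: b') p.1 = q.2 := by simp [lk, heq]
        have hlka : lk (p :: a') q.1 = p.2 := by simp [lk, heq.symm]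
        have hca1 : (a'.any fun r => decide (lk (q :: b') r.1 < r.2)) =
            (a'.any fun r => decide (lk b' r.1 < r.2)) := by
          refine anyCongrMem _ _ _ (fun r hr => ?_)
          have : q.1 ≠ r.1 := heq ▸ ne_of_lt ((List.pairwise_cons.mp ha).1 r hr)
          simp [lk, this]
        have hca2 : (a'.any fun r => decide (r.2 < lk (q :: b') r.1)) =
            (a'.any fun r => decide (r.2 < lk b' r.1)) := by
          refine anyCongrMem _ _ _ (fun r hr => ?_)
          have : q.1 ≠ r.1 := heq ▸ ne_of_lt ((List.pairwise_cons.mp ha).1 r hr)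
          simp [lk, this]
        have hcb1 : (b'.any fun r => decide (lk (p :: a') r.1 < r.2)) =
            (b'.any fun r => decide (lk a' r.1 < r.2)) := by
          refine anyCongrMem _ _ _ (fun r hr => ?_)
          have : p.1 ≠ r.1 := heq ▸ ne_of_lt ((List.pairwise_cons.mp hb).1 r hr)
          simp [lk, this]
        have hcb2 : (b'.any fun r => decide (r.2 < lk (p :: a') r.1)) =
            (b'.any fun r => decide (r.2 < lk a' r.1)) := by
          refine anyCongrMem _ _ _ (fun r hr => ?_)
          have : p.1 ≠ r.1 := heq ▸ ne_of_lt ((List.pairwise_cons.mp hb).1 r hr)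
          simp [lk, this]
        have ihT := mergeLoop_eq a' b' true ha' hb'
        have ihF := mergeLoop_eq a' b' flag ha' hb'
        simp only [mergeLoop, if_neg hab, if_neg hba, List.any_cons, hlkb, hlka]
        by_cases h1 : p.2 < q.2
        · simp [h1]
        · by_cases h2 : q.2 < p.2
          · rw [ihT] at *
            simp [gt_iff_lt, h1, h2, hca1, hca2, hcb1, hcb2]
          · rw [ihF] at *
            simp [gt_iff_lt, h1, h2, hca1, hca2, hcb1, hcb2]
termination_by a.length + b.length
decreasing_by all_goals simp <;> omega

-- A-side loop characterizations (as in the reference proof)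
theorem aLoop2_eq (D1 D2 : PySem.Dict String Int) (ks : List String) (flag : Bool) :
    aLoop2 D1 D2 ks flag =
      if ks.any (fun k => D1.getD k 0 < D2.getD k 0) then false
      else (flag || ks.any (fun k => D1.getD k 0 > D2.getD k 0)) := by
  induction ks generalizing flag with
  | nil => simp [aLoop2]
  | cons k rest ih =>
    simp only [aLoop2, ← PySem.Dict.getD_eq_get?_getD, List.any_cons]
    by_cases hlt : D1.getD k 0 < D2.getD k 0
    · simp [hlt]
    · by_cases hgt : D1.getD k 0 > D2.getD k 0
      · simp [hlt, hgt, ih]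
      · simp [hlt, hgt, ih]

theorem aLoop1_eq (D1 D2 : PySem.Dict String Int) (ks : List String) (flag : Bool) :
    aLoop1 D1 D2 ks flag =
      if ks.any (fun k => D1.getD k 0 < D2.getD k 0) then false
      else aLoop2 D1 D2 D2.keys (flag || ks.any (fun k => D1.getD k 0 > D2.getD k 0)) := by
  induction ks generalizing flag with
  | nil => simp [aLoop1]
  | cons k rest ih =>
    simp only [aLoop1, ← PySem.Dict.getD_eq_get?_getD, List.any_cons]
    by_cases hlt : D1.getD k 0 < D2.getD k 0
    · simp [hlt]
    · by_cases hgt : D1.getD k 0 > D2.getD k 0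
      · simp [hlt, hgt, ih]
      · simp [hlt, hgt, ih]

-- the sorted item list of a dict has strictly increasing keys
theorem sorted_items_pairwise (d : PySem.Dict String Int) (hnd : d.keys.Nodup) :
    (PySem.List.sorted d.items (fun kv => kv.1) false).Pairwise (fun p q : String × Int => p.1 < q.1) := by
  have hle := PySem.List.sorted_pairwise (xs := d.items) (key := fun kv => kv.1)
  have hperm : (PySem.List.sorted d.items (fun kv => kv.1) false).Perm d.items :=
    PySem.List.sorted_perm _ _ _
  have hndk : ((PySem.List.sorted d.items (fun kv => kv.1) false).map Prod.fst).Nodup := by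
    have : ((PySem.List.sorted d.items (fun kv => kv.1) false).map Prod.fst).Perm (d.items.map Prod.fst) :=
      hperm.map Prod.fst
    exact this.nodup_iff.mpr hnd
  have hne : (PySem.List.sorted d.items (fun kv => kv.1) false).Pairwise
      (fun p q : String × Int => p.1 ≠ q.1) := (List.pairwise_map.mp hndk)
  exact (hle.and hne).imp (fun h => lt_of_le_of_ne h.1 h.2)

-- lookup in the sorted item list = getD on the dict
theorem lk_sorted_eq_getD (d : PySem.Dict String Int) (hnd : d.keys.Nodup) (k : String) :
    lk (PySem.List.sorted d.items (fun kv => kv.1) false) k = d.getD k 0 := by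
  set l := PySem.List.sorted d.items (fun kv => kv.1) false with hl
  have hperm : l.Perm d.items := PySem.List.sorted_perm _ _ _
  have hndk : (l.map Prod.fst).Nodup := (hperm.map Prod.fst).nodup_iff.mpr hnd
  by_cases hmem : k ∈ l.map Prod.fst
  · rcases List.mem_map.mp hmem with ⟨p, hp, hpk⟩
    obtain ⟨k', v⟩ := p
    cases hpk
    rw [lk_of_mem l _ v hp hndk]
    exact (PySem.Dict.getD_of_mem_items d (hperm.mem_iff.mp hp) hnd 0).symm
  · rw [lk_eq_zero l k (fun r hr => fun he => hmem (he ▸ List.mem_map_of_mem (f := Prod.fst) hr))]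
    have hnk : k ∉ d.keys := by
      intro hk
      rcases List.mem_map.mp hk with ⟨p, hp, hpk⟩
      exact hmem (List.mem_map.mpr ⟨p, hperm.mem_iff.mpr hp, hpk⟩)
    rw [PySem.Dict.getD_of_not_contains]
    rcases h : d.contains k with _ | _
    · rfl
    · exact absurd ((PySem.Dict.contains_iff_mem_keys d k).mp h) hnk

-- an any over the sorted item list = an any over the dict's keys
theorem any_sorted_eq_any_keys (d : PySem.Dict String Int) (hnd : d.keys.Nodup)
    (f : String → Int → Bool) :
    (PySem.List.sorted d.items (fun kv => kv.1) false).any (fun p => f p.1 p.2) =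
    d.keys.any (fun k => f k (d.getD k 0)) := by
  have hperm : (PySem.List.sorted d.items (fun kv => kv.1) false).Perm d.items :=
    PySem.List.sorted_perm _ _ _
  rw [hperm.any_eq]
  show d.items.any (fun p => f p.1 p.2) = (d.items.map Prod.fst).any (fun k => f k (d.getD k 0))
  rw [List.any_map]
  refine anyCongrMem _ _ _ (fun p hp => ?_)
  obtain ⟨k, v⟩ := p
  simp only [Function.comp]
  rw [PySem.Dict.getD_of_mem_items d hp hnd 0]

-- ===== VERDICT (by name: the statement is the Claim_ definition above) =====
theorem isGreaterThan_spec : Claim_equal_isGreaterThan := by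
  intro dict1 dict2 _
  unfold Spec_isGreaterThan isGreaterThan isGreaterThan_alt
  set D1 := PySem.Dict.ofList dict1 with hD1
  set D2 := PySem.Dict.ofList dict2 with hD2
  have hnd1 : D1.keys.Nodup := PySem.Dict.nodup_keys_ofList dict1
  have hnd2 : D2.keys.Nodup := PySem.Dict.nodup_keys_ofList dict2
  rw [mergeLoop_eq _ _ _ (sorted_items_pairwise D1 hnd1) (sorted_items_pairwise D2 hnd2)]
  have hlkb : ∀ k, lk (PySem.List.sorted D2.items (fun kv => kv.1) false) k = D2.getD k 0 :=
    lk_sorted_eq_getD D2 hnd2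
  have hlka : ∀ k, lk (PySem.List.sorted D1.items (fun kv => kv.1) false) k = D1.getD k 0 :=
    lk_sorted_eq_getD D1 hnd1
  have e1 : (PySem.List.sorted D1.items (fun kv => kv.1) false).any
      (fun p => decide (p.2 < lk (PySem.List.sorted D2.items (fun kv => kv.1) false) p.1)) =
      D1.keys.any (fun k => decide (D1.getD k 0 < D2.getD k 0)) := by
    rw [show (fun p : String × Int => decide (p.2 < lk (PySem.List.sorted D2.items (fun kv => kv.1) false) p.1)) =
        (fun p : String × Int => decide (p.2 < D2.getD p.1 0)) from funext (fun p => by rw [hlkb])]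
    exact any_sorted_eq_any_keys D1 hnd1 (fun k v => decide (v < D2.getD k 0))
  have e2 : (PySem.List.sorted D2.items (fun kv => kv.1) false).any
      (fun q => decide (lk (PySem.List.sorted D1.items (fun kv => kv.1) false) q.1 < q.2)) =
      D2.keys.any (fun k => decide (D1.getD k 0 < D2.getD k 0)) := by
    rw [show (fun q : String × Int => decide (lk (PySem.List.sorted D1.items (fun kv => kv.1) false) q.1 < q.2)) =
        (fun q : String × Int => decide (D1.getD q.1 0 < q.2)) from funext (fun q => by rw [hlka])]
    exact any_sorted_eq_any_keys D2 hnd2 (fun k v => decide (D1.getD k 0 < v))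
  have e3 : (PySem.List.sorted D1.items (fun kv => kv.1) false).any
      (fun p => decide (lk (PySem.List.sorted D2.items (fun kv => kv.1) false) p.1 < p.2)) =
      D1.keys.any (fun k => decide (D2.getD k 0 < D1.getD k 0)) := by
    rw [show (fun p : String × Int => decide (lk (PySem.List.sorted D2.items (fun kv => kv.1) false) p.1 < p.2)) =
        (fun p : String × Int => decide (D2.getD p.1 0 < p.2)) from funext (fun p => by rw [hlkb])]
    exact any_sorted_eq_any_keys D1 hnd1 (fun k v => decide (D2.getD k 0 < v))
  have e4 : (PySem.List.sorted D2.items (fun kv => kv.1) false).any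
      (fun q => decide (q.2 < lk (PySem.List.sorted D1.items (fun kv => kv.1) false) q.1)) =
      D2.keys.any (fun k => decide (D2.getD k 0 < D1.getD k 0)) := by
    rw [show (fun q : String × Int => decide (q.2 < lk (PySem.List.sorted D1.items (fun kv => kv.1) false) q.1)) =
        (fun q : String × Int => decide (q.2 < D1.getD q.1 0)) from funext (fun q => by rw [hlka])]
    exact any_sorted_eq_any_keys D2 hnd2 (fun k v => decide (v < D1.getD k 0))
  rw [aLoop1_eq, aLoop2_eq, e1, e2, e3, e4]
  by_cases h1 : D1.keys.any (fun k => decide (D1.getD k 0 < D2.getD k 0)) = true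
  · simp [h1]
  · by_cases h2 : D2.keys.any (fun k => decide (D1.getD k 0 < D2.getD k 0)) = true
    · simp [h1, h2]
    · simp [h1, h2, gt_iff_lt]
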